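-- pv_equiv track=rewrite | github.com/Joooook/12306-skill | scripts/12306_apis.py | parse_route_stations_info
-- ===== SOURCE A (Python) =====
-- from typing import Any, Callable, Literal
--
-- def parse_route_stations_info(route_stations_data: list[dict[str, Any]]) -> list[dict[str, Any]]:
--     if not route_stations_data: return []
--     first = route_stations_data[0]
--     result: list[dict[str, Any]] = [{
--         "train_class_name": first.get("train_class_name"),
--         "service_type": first.get("service_type"),
--         "end_station_name": first.get("end_station_name"),
--         "station_name": first.get("station_name"),
--         "station_train_code": first.get("station_train_code"),
--         "arrive_time": first.get("arrive_time"),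
--         "start_time": first.get("start_time"),
--         "lishi": first.get("running_time"),
--         "arrive_day_str": first.get("arrive_day_str")
--     }]
--     for routeStationData in route_stations_data[1:]:
--         result.append({
--             "station_name": routeStationData.get("station_name"),
--             "station_train_code": routeStationData.get("station_train_code"),
--             "arrive_time": routeStationData.get("arrive_time"),
--             "start_time": routeStationData.get("start_time"),
--             "lishi": routeStationData.get("running_time"),
--             "arrive_day_str": routeStationData.get("arrive_day_str")
--         })
--     return result
-- ===== SOURCE B (Python) =====
-- _COMMON_TABLE = [
--     ("station_name", "station_name"),
--     ("station_train_code", "station_train_code"),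
--     ("arrive_time", "arrive_time"),
--     ("start_time", "start_time"),
--     ("lishi", "running_time"),
--     ("arrive_day_str", "arrive_day_str"),
-- ]
--
-- _HEAD_TABLE = [
--     ("train_class_name", "train_class_name"),
--     ("service_type", "service_type"),
--     ("end_station_name", "end_station_name"),
-- ] + _COMMON_TABLE
--
--
-- def parse_route_stations_info(route_stations_data):
--     # Data-driven: each row is built by mapping a (output_key, source_key) table
--     # over the record; the head row simply uses a longer table. Recursion on the
--     # list structure instead of an explicit loop.
--     def go(records, table):
--         if not records:
--             return []
--         row = {out_key: records[0].get(src_key) for out_key, src_key in table}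
--         return [row] + go(records[1:], _COMMON_TABLE)
--
--     return go(route_stations_data, _HEAD_TABLE)
-- ===== Notes on version B (the rewrite author's own statement) =====
-- stated objective: alternative
-- what changed: Replaces A's two hardcoded dict literals and head-special-cased loop with a data-driven scheme: a single recursive walk builds every row by mapping an (output_key, source_key) table over the record, the head row merely receiving a longer table.
import Mathlib
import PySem

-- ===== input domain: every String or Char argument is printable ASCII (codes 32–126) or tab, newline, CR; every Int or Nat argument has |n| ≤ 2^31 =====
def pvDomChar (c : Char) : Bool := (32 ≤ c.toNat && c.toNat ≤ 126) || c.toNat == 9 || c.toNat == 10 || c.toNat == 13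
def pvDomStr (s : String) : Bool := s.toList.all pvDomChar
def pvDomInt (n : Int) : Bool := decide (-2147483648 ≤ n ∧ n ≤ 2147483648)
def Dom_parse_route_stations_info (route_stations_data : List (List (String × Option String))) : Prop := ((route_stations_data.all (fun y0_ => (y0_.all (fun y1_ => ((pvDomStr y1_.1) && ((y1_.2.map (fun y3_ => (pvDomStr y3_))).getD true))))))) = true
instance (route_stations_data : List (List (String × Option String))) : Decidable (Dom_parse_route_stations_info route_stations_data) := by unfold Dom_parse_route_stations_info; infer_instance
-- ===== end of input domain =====

-- B is a data-driven alternative: one recursive walk builds each row by mapping a key table over the record (the head row gets a longer table), instead of A's two hardcoded dict literals with a special-cased head.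

-- ===== PORT A =====
def parse_route_stations_info (route_stations_data : List (List (String × Option String))) : List (List (String × Option String)) :=
  match route_stations_data with
  | [] => []
  | first :: rest =>
    let result : List (List (String × Option String)) := [[
      ("train_class_name", PySem.Dict.getD (PySem.Dict.mk first) "train_class_name" none),
      ("service_type", PySem.Dict.getD (PySem.Dict.mk first) "service_type" none),
      ("end_station_name", PySem.Dict.getD (PySem.Dict.mk first) "end_station_name" none),
      ("station_name", PySem.Dict.getD (PySem.Dict.mk first) "station_name" none),
      ("station_train_code", PySem.Dict.getD (PySem.Dict.mk first) "station_train_code" none),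
      ("arrive_time", PySem.Dict.getD (PySem.Dict.mk first) "arrive_time" none),
      ("start_time", PySem.Dict.getD (PySem.Dict.mk first) "start_time" none),
      ("lishi", PySem.Dict.getD (PySem.Dict.mk first) "running_time" none),
      ("arrive_day_str", PySem.Dict.getD (PySem.Dict.mk first) "arrive_day_str" none)]]
    rest.foldl (fun acc r => acc ++ [[
      ("station_name", PySem.Dict.getD (PySem.Dict.mk r) "station_name" none),
      ("station_train_code", PySem.Dict.getD (PySem.Dict.mk r) "station_train_code" none),
      ("arrive_time", PySem.Dict.getD (PySem.Dict.mk r) "arrive_time" none),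
      ("start_time", PySem.Dict.getD (PySem.Dict.mk r) "start_time" none),
      ("lishi", PySem.Dict.getD (PySem.Dict.mk r) "running_time" none),
      ("arrive_day_str", PySem.Dict.getD (PySem.Dict.mk r) "arrive_day_str" none)]]) result

-- ===== PORT B =====
-- (output_key, source_key) tables, as in Source B
def pvCommonTable : List (String × String) :=
  [("station_name", "station_name"), ("station_train_code", "station_train_code"),
   ("arrive_time", "arrive_time"), ("start_time", "start_time"),
   ("lishi", "running_time"), ("arrive_day_str", "arrive_day_str")]

def pvHeadTable : List (String × String) :=
  [("train_class_name", "train_class_name"), ("service_type", "service_type"),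
   ("end_station_name", "end_station_name")] ++ pvCommonTable

-- Source B's inner 'go': recursion on the records, each row = table mapped over the record
def pvGo (records : List (List (String × Option String))) (table : List (String × String)) :
    List (List (String × Option String)) :=
  match records with
  | [] => []
  | r :: rest =>
    (table.map (fun k => (k.1, PySem.Dict.getD (PySem.Dict.mk r) k.2 none))) :: pvGo rest pvCommonTable

def parse_route_stations_info_alt (route_stations_data : List (List (String × Option String))) : List (List (String × Option String)) :=
  pvGo route_stations_data pvHeadTable

-- ===== PRECONDITION & SPEC =====
def Spec_parse_route_stations_info (route_stations_data : List (List (String × Option String))) (out : List (List (String × Option String))) : Prop := out = parse_route_stations_info_alt route_stations_data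
instance (route_stations_data : List (List (String × Option String))) (out : List (List (String × Option String))) : Decidable (Spec_parse_route_stations_info route_stations_data out) := by unfold Spec_parse_route_stations_info; infer_instance

-- ===== CLAIM =====
def Claim_equal_parse_route_stations_info : Prop := ∀ (route_stations_data : List (List (String × Option String))), Dom_parse_route_stations_info route_stations_data → Spec_parse_route_stations_info route_stations_data (parse_route_stations_info route_stations_data)

-- ===== LEMMAS AND PROOFS =====
theorem pv_foldl_append_map {α β : Type} (g : α → β) (l : List α) (acc : List β) :
    l.foldl (fun a r => a ++ [g r]) acc = acc ++ l.map g := by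
  induction l generalizing acc with
  | nil => simp
  | cons x xs ih => simp [List.foldl, ih]

-- a tail call of go always uses the common table, giving exactly the 6-field rows
theorem pv_go_common (l : List (List (String × Option String))) :
    pvGo l pvCommonTable = l.map (fun r => [
      ("station_name", PySem.Dict.getD (PySem.Dict.mk r) "station_name" none),
      ("station_train_code", PySem.Dict.getD (PySem.Dict.mk r) "station_train_code" none),
      ("arrive_time", PySem.Dict.getD (PySem.Dict.mk r) "arrive_time" none),
      ("start_time", PySem.Dict.getD (PySem.Dict.mk r) "start_time" none),
      ("lishi", PySem.Dict.getD (PySem.Dict.mk r) "running_time" none),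
      ("arrive_day_str", PySem.Dict.getD (PySem.Dict.mk r) "arrive_day_str" none)]) := by
  induction l with
  | nil => rfl
  | cons x xs ih => simp only [pvGo, ih, List.map_cons]; rfl

-- ===== VERDICT =====
theorem parse_route_stations_info_spec : Claim_equal_parse_route_stations_info := by
  intro d _
  unfold Spec_parse_route_stations_info parse_route_stations_info parse_route_stations_info_alt
  cases d with
  | nil => rfl
  | cons first rest =>
    simp only [pv_foldl_append_map, pvGo, pv_go_common]
    rfl
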